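-- pv_equiv track=rewrite | github.com/my7370455-art/2025_fall_python_assignment | dawn_before_final/hide_the_needle.py | hide_string
-- ===== SOURCE A (Python) =====
-- def hide_string(s: str, hide: str) -> str:
--     s_lis = list(s)
--     hide_lis = list(hide)
--     pointer = 0
--     for char in s_lis:
--         try:
--             hide_lis.remove(char)
--         except ValueError:
--             return "Impossible"
--
--     hide_lis.sort()
--     ans = []
--     for char in s_lis:
--         for i in range(len(hide_lis)):
--             if hide_lis[i] < char:
--                 ans.append(hide_lis[i])
--                 if i == len(hide_lis) - 1:
--                     hide_lis = []
--             else: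
--                 hide_lis = hide_lis[i:]
--                 break
--         ans.append(char)
--     ans.extend(hide_lis)
--     return ''.join(ans)
-- ===== SOURCE B (Python) =====
-- def hide_string(s: str, hide: str) -> str:
--     counts = {}
--     for c in hide:
--         counts[c] = counts.get(c, 0) + 1
--     for c in s:
--         if counts.get(c, 0) == 0:
--             return "Impossible"
--         counts[c] = counts.get(c, 0) - 1
--     leftover = sorted(c for c, k in counts.items() for _ in range(k))
--     n = len(leftover)
--     out = []
--     i = 0
--     for c in s:
--         while i < n and leftover[i] < c:
--             out.append(leftover[i])
--             i += 1
--         out.append(c)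
--     out.extend(leftover[i:])
--     return "".join(out)
-- ===== Notes on version B (the rewrite author's own statement) =====
-- stated objective: faster
-- what changed: Replaced A's per-character list.remove validation and repeated rescans/slicing of the leftover list by a character-count dict built in one pass plus a single two-pointer merge over the sorted leftover.
import Mathlib
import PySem

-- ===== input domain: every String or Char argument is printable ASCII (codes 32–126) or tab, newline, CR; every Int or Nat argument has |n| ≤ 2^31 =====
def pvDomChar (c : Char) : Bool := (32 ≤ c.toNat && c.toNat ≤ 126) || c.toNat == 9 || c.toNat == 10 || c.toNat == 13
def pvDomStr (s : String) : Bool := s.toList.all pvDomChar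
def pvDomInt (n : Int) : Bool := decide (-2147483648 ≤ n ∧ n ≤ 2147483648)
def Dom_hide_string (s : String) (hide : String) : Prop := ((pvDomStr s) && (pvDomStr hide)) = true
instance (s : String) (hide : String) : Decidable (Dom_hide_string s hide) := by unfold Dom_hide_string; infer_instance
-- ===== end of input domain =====

-- B replaces A's repeated list.remove validation and per-character rescans of the leftover
-- list by a counting dict plus a single two-pointer merge (objective: faster).

-- ===== PORT A =====
-- 'for char in s_lis: hide_lis.remove(char)' with the try/except returning "Impossible"
def hsRemoveAll : List Char → List Char → Option (List Char)
  | [], h => some h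
  | c :: cs, h =>
    match PySem.List.remove? h c with
    | none => none
    | some h' => hsRemoveAll cs h'

-- the inner 'for i in range(len(hide_lis))' with its break / end-of-list reassignment,
-- as recursion on the suffix of hide_lis: returns (chars appended to ans, new hide_lis)
def hsInner : List Char → Char → List Char × List Char
  | [], _ => ([], [])
  | x :: rest, c =>
    if x < c then
      let r := hsInner rest c
      (x :: r.1, r.2)
    else ([], x :: rest)

-- the outer 'for char in s_lis' loop carrying ans and hide_lis
def hsLoopA : List Char → List Char → List Char → List Char × List Char
  | [], ans, h => (ans, h)
  | c :: cs, ans, h =>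
    let r := hsInner h c
    hsLoopA cs (ans ++ r.1 ++ [c]) r.2

def hide_string (s : String) (hide : String) : String :=
  match hsRemoveAll s.toList hide.toList with
  | none => "Impossible"
  | some h0 =>
    let h1 := PySem.List.sorted h0 (fun x => x)
    let r := hsLoopA s.toList [] h1
    String.ofList (r.1 ++ r.2)

-- ===== PORT B =====
-- counts = {}; for c in hide: counts[c] = counts.get(c, 0) + 1
def hsCounts (hide : List Char) : PySem.Dict Char Int :=
  hide.foldl (fun d c => d.insert c (d.getD c 0 + 1)) PySem.Dict.empty

-- for c in s: if counts.get(c,0) == 0: return "Impossible"; counts[c] = counts.get(c,0) - 1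
def hsConsume : List Char → PySem.Dict Char Int → Option (PySem.Dict Char Int)
  | [], d => some d
  | c :: cs, d =>
    if d.getD c 0 = 0 then none
    else hsConsume cs (d.insert c (d.getD c 0 - 1))

-- the pointer-i while loop inside 'for c in s', plus the final extend of leftover[i:]
def hsMergeB : List Char → List Char → List Char
  | [], left => left
  | c :: cs, [] => c :: hsMergeB cs []
  | c :: cs, x :: left =>
    if x < c then x :: hsMergeB (c :: cs) left
    else c :: hsMergeB cs (x :: left)
termination_by s left => s.length + left.length

def hide_string_alt (s : String) (hide : String) : String :=
  match hsConsume s.toList (hsCounts hide.toList) with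
  | none => "Impossible"
  | some d =>
    let leftover :=
      PySem.List.sorted (d.items.flatMap fun p => List.replicate p.2.toNat p.1) (fun x => x)
    String.ofList (hsMergeB s.toList leftover)

-- ===== PRECONDITION & SPEC =====
def Spec_hide_string (s : String) (hide : String) (out : String) : Prop := out = hide_string_alt s hide
instance (s : String) (hide : String) (out : String) : Decidable (Spec_hide_string s hide out) := by unfold Spec_hide_string; infer_instance

-- ===== CLAIM (what is proved, stated in full; the proofs are below) =====
def Claim_equal_hide_string : Prop := ∀ (s : String) (hide : String), Dom_hide_string s hide → Spec_hide_string s hide (hide_string s hide)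

-- ===== LEMMAS AND PROOFS =====

-- the counting dict of B starts out agreeing with hide's character counts
lemma hsCounts_getD (l : List Char) (x : Char) : (hsCounts l).getD x 0 = (l.count x : Int) := by
  unfold hsCounts
  rw [PySem.Dict.foldl_insert_getD_add_one_eq_counter, PySem.Dict.getD_counter]

lemma hsCounts_nodup (l : List Char) : (hsCounts l).keys.Nodup := by
  unfold hsCounts
  rw [PySem.Dict.foldl_insert_getD_add_one_eq_counter]
  exact PySem.Dict.nodup_keys_counter l

-- A's remove loop and B's decrement loop fail together, and on success the dict
-- records exactly the counts of A's remaining list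
lemma consume_removeAll : ∀ (cs h : List Char) (d : PySem.Dict Char Int),
    d.keys.Nodup → (∀ x, d.getD x 0 = (h.count x : Int)) →
    (hsRemoveAll cs h = none ∧ hsConsume cs d = none) ∨
    (∃ h' d', hsRemoveAll cs h = some h' ∧ hsConsume cs d = some d' ∧
      d'.keys.Nodup ∧ (∀ x, d'.getD x 0 = (h'.count x : Int))) := by
  intro cs
  induction cs with
  | nil => intro h d hn hr; exact Or.inr ⟨h, d, rfl, rfl, hn, hr⟩
  | cons c cs ih =>
    intro h d hn hr
    by_cases hc : c ∈ h
    · have hcount : 1 ≤ h.count c := List.one_le_count_iff.mpr hc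
      have hrm : hsRemoveAll (c :: cs) h = hsRemoveAll cs (h.erase c) := by
        simp only [hsRemoveAll, PySem.List.remove?_eq_some_erase h c hc]
      have hne : ¬ d.getD c 0 = 0 := by
        rw [hr c]; omega
      have hcons : hsConsume (c :: cs) d = hsConsume cs (d.insert c (d.getD c 0 - 1)) := by
        simp only [hsConsume, if_neg hne]
      rw [hrm, hcons]
      apply ih
      · exact PySem.Dict.nodup_keys_insert d c _ hn
      · intro x
        rw [PySem.Dict.getD_insert, hr c, List.count_erase]
        by_cases hx : x = c
        · subst hx; simp only [beq_self_eq_true, if_pos]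
          omega
        · rw [if_neg hx, hr x]
          have : (c == x) = false := by simp [Ne.symm hx]
          rw [this]; simp
    · left
      constructor
      · simp only [hsRemoveAll, (PySem.List.remove?_eq_none_iff h c).mpr hc]
      · have : d.getD c 0 = 0 := by
          rw [hr c, List.count_eq_zero_of_not_mem hc]; rfl
        simp only [hsConsume, if_pos this]

-- counting the flatMap-of-replicates of an association list with distinct nonnegative keys
lemma count_flatMap_rep_zero : ∀ (L : List (Char × Int)) (x : Char),
    (∀ p ∈ L, p.1 ≠ x) → (L.flatMap fun p => List.replicate p.2.toNat p.1).count x = 0 := by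
  intro L
  induction L with
  | nil => intro x _; rfl
  | cons p L ih =>
    intro x hne
    simp only [List.flatMap_cons, List.count_append, List.count_replicate]
    rw [ih x (fun q hq => hne q (List.mem_cons_of_mem p hq))]
    have : (p.1 == x) = false := by simp [hne p (List.mem_cons_self)]
    rw [this]; simp

lemma count_flatMap_rep : ∀ (L : List (Char × Int)) (x : Char),
    (L.map Prod.fst).Nodup → (∀ p ∈ L, 0 ≤ p.2) →
    (((L.flatMap fun p => List.replicate p.2.toNat p.1).count x : Int))
      = (PySem.Dict.mk L).getD x 0 := by
  intro L
  induction L with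
  | nil => intro x _ _; rfl
  | cons p L ih =>
    intro x hn hpos
    simp only [List.map_cons, List.nodup_cons] at hn
    simp only [List.flatMap_cons, List.count_append, List.count_replicate]
    rw [PySem.Dict.getD_eq_get?_getD, PySem.Dict.get?_mk_cons]
    by_cases hx : p.1 = x
    · have hz : (L.flatMap fun q => List.replicate q.2.toNat q.1).count x = 0 := by
        apply count_flatMap_rep_zero
        intro q hq hqx
        have hm : q.1 ∈ L.map Prod.fst := List.mem_map_of_mem hq
        rw [hqx, ← hx] at hm
        exact hn.1 hm
      rw [hz]
      have hb : (p.1 == x) = true := by simp [hx]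
      rw [hb]
      have : 0 ≤ p.2 := hpos p List.mem_cons_self
      simp only [beq_iff_eq] at hb
      simp [Int.toNat_of_nonneg this]
    · have hb : (p.1 == x) = false := by simp [hx]
      rw [hb]
      have := ih x hn.2 (fun q hq => hpos q (List.mem_cons_of_mem p hq))
      rw [PySem.Dict.getD_eq_get?_getD] at this
      simp [this]

-- on success, B's rebuilt leftover list is a permutation of A's remaining list
lemma leftover_perm (d : PySem.Dict Char Int) (h : List Char)
    (hn : d.keys.Nodup) (hr : ∀ x, d.getD x 0 = (h.count x : Int)) :
    (d.items.flatMap fun p => List.replicate p.2.toNat p.1).Perm h := by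
  rw [List.perm_iff_count]
  intro x
  have hmk : PySem.Dict.mk d.items = d := rfl
  have hn' : (d.items.map Prod.fst).Nodup := hn
  have hpos : ∀ p ∈ d.items, 0 ≤ p.2 := by
    intro p hp
    have := PySem.Dict.getD_of_mem_items d (k := p.1) (v := p.2) hp hn 0
    rw [hr p.1] at this
    omega
  have := count_flatMap_rep d.items x hn' hpos
  rw [hmk, hr x] at this
  exact_mod_cast this

-- B's two-pointer merge processes one s-character exactly like A's inner scan
lemma mergeB_cons : ∀ (h : List Char) (c : Char) (cs : List Char),
    hsMergeB (c :: cs) h = (hsInner h c).1 ++ c :: hsMergeB cs (hsInner h c).2 := by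
  intro h
  induction h with
  | nil => intro c cs; simp [hsMergeB, hsInner]
  | cons x rest ih =>
    intro c cs
    by_cases hx : x < c
    · simp only [hsMergeB, if_pos hx, ih c cs, hsInner, List.cons_append]
    · simp only [hsMergeB, if_neg hx, hsInner, List.nil_append]

-- A's outer loop accumulates exactly B's merge output
lemma loopA_eq_merge : ∀ (cs ans h : List Char),
    (hsLoopA cs ans h).1 ++ (hsLoopA cs ans h).2 = ans ++ hsMergeB cs h := by
  intro cs
  induction cs with
  | nil => intro ans h; simp [hsLoopA, hsMergeB]
  | cons c cs ih =>
    intro ans h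
    show (hsLoopA cs (ans ++ (hsInner h c).1 ++ [c]) (hsInner h c).2).1
        ++ (hsLoopA cs (ans ++ (hsInner h c).1 ++ [c]) (hsInner h c).2).2
        = ans ++ hsMergeB (c :: cs) h
    rw [ih, mergeB_cons]
    simp

-- ===== VERDICT (by name: the statement is the Claim_ definition above) =====
theorem hide_string_spec : Claim_equal_hide_string := by
  intro s hide _
  unfold Spec_hide_string hide_string hide_string_alt
  have h0 := consume_removeAll s.toList hide.toList (hsCounts hide.toList)
      (hsCounts_nodup hide.toList) (fun x => hsCounts_getD hide.toList x)
  rcases h0 with ⟨hra, hco⟩ | ⟨h', d', hra, hco, hn', hr'⟩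
  · rw [hra, hco]
  · rw [hra, hco]
    simp only []
    have hperm := leftover_perm d' h' hn' hr'
    have hsorted := PySem.List.sorted_eq_sorted_of_perm
        (d'.items.flatMap fun p => List.replicate p.2.toNat p.1) h' (fun x => x)
        (fun _ _ hxy => hxy) hperm
    rw [hsorted]
    congr 1
    rw [loopA_eq_merge]
    rfl
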